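-- pv_equiv track=rewrite | github.com/seungriyou/algorithm-study | _Codility/lessons/CL-08_1-dominator_O(nlogn).py | solution
-- ===== SOURCE A (Python) =====
-- def solution(A):
--     # if len(A) == 0, return -1
--     if not A:
--         return -1
--
--     # sort A (using enumerate for idx)
--     A = sorted(list((a, i) for i, a in enumerate(A)))
--
--     # get middle element
--     mid = len(A) // 2
--     candidate = A[mid][0]
--
--     # check if the candidiate is dominant
--     idx = cnt = 0
--     for a, i in A:
--         if a == candidate:
--             cnt += 1
--             idx = i
--
--     return idx if cnt > mid else -1
-- ===== SOURCE B (Python) =====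
-- def solution(A):
--     # one pass: count occurrences in a dict; whenever some value's count
--     # exceeds len(A)//2 it is the (unique) dominator, so remember that index
--     n = len(A)
--     mid = n // 2
--     counts = {}
--     best = -1
--     for i, a in enumerate(A):
--         counts[a] = counts.get(a, 0) + 1
--         if counts[a] > mid:
--             best = i
--     return best
-- ===== Notes on version B (the rewrite author's own statement) =====
-- stated objective: faster
-- what changed: Replaces sort-the-(value,index)-pairs-and-inspect-the-middle-element with a single hash-counting pass that records the index whenever a value's running count exceeds len(A)//2, so the last recorded index is the dominator's last index.
import Mathlib
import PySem

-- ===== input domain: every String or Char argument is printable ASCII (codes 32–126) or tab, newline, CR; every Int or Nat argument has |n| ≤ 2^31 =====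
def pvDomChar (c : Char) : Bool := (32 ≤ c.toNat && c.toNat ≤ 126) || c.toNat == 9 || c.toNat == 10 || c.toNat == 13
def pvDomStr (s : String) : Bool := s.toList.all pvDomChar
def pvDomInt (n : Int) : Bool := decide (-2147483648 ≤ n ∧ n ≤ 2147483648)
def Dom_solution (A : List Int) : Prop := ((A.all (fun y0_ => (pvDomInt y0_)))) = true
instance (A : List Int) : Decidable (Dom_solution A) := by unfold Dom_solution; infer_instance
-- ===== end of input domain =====

-- B replaces A's sort-the-(value,index)-pairs-and-take-the-middle dominator search by a
-- single counting pass over a dict that records the index whenever a running count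
-- exceeds len(A)//2 (objective: faster).

-- ===== PORT A =====
def solution (A : List Int) : Int :=
  if A = [] then -1
  else
    -- A = sorted((a, i) for i, a in enumerate(A))  (lexicographic tuple sort)
    let s := PySem.List.sorted2 ((PySem.List.enumerate A).map (fun p => (p.2, p.1))) Prod.fst Prod.snd
    let mid := PySem.Int.floordiv (PySem.List.len s) 2
    -- candidate = A[mid][0]; 0 ≤ mid < len(s) here, so the index is always in range
    let candidate := (PySem.List.pyGetD s mid ((0 : Int), (0 : Int))).1
    -- idx = cnt = 0; for a, i in A: if a == candidate: cnt += 1; idx = i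
    let r := s.foldl (fun (st : Int × Int) p =>
      (if p.1 = candidate then p.2 else st.1,
       if p.1 = candidate then st.2 + 1 else st.2)) (0, 0)
    if r.2 > mid then r.1 else -1

-- ===== PORT B =====
def solution_alt (A : List Int) : Int :=
  let n := PySem.List.len A
  let mid := PySem.Int.floordiv n 2
  -- counts = {}; best = -1
  -- for i, a in enumerate(A): counts[a] = counts.get(a, 0) + 1; if counts[a] > mid: best = i
  let r := (PySem.List.enumerate A).foldl
    (fun (st : PySem.Dict Int Int × Int) p =>
      let counts := st.1.insert p.2 (st.1.getD p.2 0 + 1)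
      (counts, if counts.getD p.2 0 > mid then p.1 else st.2))
    (PySem.Dict.empty, -1)
  r.2

-- ===== PRECONDITION & SPEC =====
def Spec_solution (A : List Int) (out : Int) : Prop := out = solution_alt A
instance (A : List Int) (out : Int) : Decidable (Spec_solution A out) := by unfold Spec_solution; infer_instance

-- ===== CLAIM (what is proved, stated in full; the proofs are below) =====
def Claim_equal_solution : Prop := ∀ (A : List Int), Dom_solution A → Spec_solution A (solution A)

-- ===== LEMMAS AND PROOFS =====

-- two distinct values cannot both occur more than half the time
theorem count_two_le (A : List Int) (c c' : Int) (h : c ≠ c') :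
    A.count c + A.count c' ≤ A.length := by
  induction A with
  | nil => simp
  | cons x t ih =>
    simp only [List.count_cons, List.length_cons, beq_iff_eq]
    split_ifs with h1 h2 h2 <;> first | (exact absurd (h1.symm.trans h2) h) | omega

theorem enum_snd (A : List Int) (s : Int) : (PySem.List.enumerate A s).map Prod.snd = A := by
  induction A generalizing s with
  | nil => simp [PySem.List.enumerate_nil]
  | cons x t ih => simp [PySem.List.enumerate_cons, ih]

theorem enum_fst_ge (A : List Int) (s : Int) : ∀ p ∈ PySem.List.enumerate A s, s ≤ p.1 := by
  induction A generalizing s with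
  | nil => simp [PySem.List.enumerate_nil]
  | cons x t ih =>
    intro p hp
    rw [PySem.List.enumerate_cons] at hp
    rcases List.mem_cons.mp hp with rfl | hp
    · simp
    · have := ih (s+1) p hp; omega

theorem enum_pairwise (A : List Int) (s : Int) :
    (PySem.List.enumerate A s).Pairwise (fun p q => p.1 < q.1) := by
  induction A generalizing s with
  | nil => simp [PySem.List.enumerate_nil]
  | cons x t ih =>
    rw [PySem.List.enumerate_cons]
    exact List.Pairwise.cons (fun q hq => by have := enum_fst_ge t (s+1) q hq; simp; omega) (ih (s+1))

-- the last index recorded by A's scan of a pair list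
theorem foldl_last_if (c : Int) (l : List (Int × Int)) (b : Int) :
    l.foldl (fun b p => if p.1 = c then p.2 else b) b
      = ((l.filter (fun p => decide (p.1 = c))).map Prod.snd).getLastD b := by
  induction l generalizing b with
  | nil => simp
  | cons x t ih =>
    by_cases hx : x.1 = c
    · rw [List.foldl_cons, if_pos hx, ih, List.filter_cons_of_pos (by simpa using hx),
        List.map_cons, List.getLastD_cons]
    · rw [List.foldl_cons, if_neg hx, ih, List.filter_cons_of_neg (by simpa using hx)]

-- Python's lexicographic tuple sort is sorting by the lexicographic Prod order
theorem sorted2_eq_sorted_lex (xs : List (Int × Int)) :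
    PySem.List.sorted2 xs Prod.fst Prod.snd
      = PySem.List.sorted xs (fun p => toLex p) := by
  have hbe : (fun a b : Int × Int => decide (a.1 < b.1) || (!decide (b.1 < a.1) && decide (a.2 < b.2)))
           = (fun a b : Int × Int => decide (toLex a < toLex b)) := by
    funext a b
    by_cases h1 : a.1 < b.1 <;> by_cases h2 : a.1 = b.1 <;> by_cases h3 : a.2 < b.2 <;>
      simp [Prod.Lex.toLex_lt_toLex, h1, h2, h3] <;> omega
  rw [PySem.List.sorted_eq_foldl_insertBy]
  show xs.foldl (fun acc x => PySem.List.insertBy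
      (fun a b : Int × Int => decide (a.1 < b.1) || (!decide (b.1 < a.1) && decide (a.2 < b.2))) x acc) []
    = _
  rw [hbe]

theorem countP_pairs (A : List Int) (c : Int) :
    (((PySem.List.enumerate A).map (fun p => (p.2, p.1))).countP (fun p => decide (p.1 = c)))
      = A.count c := by
  rw [List.countP_map]
  conv_rhs => rw [← enum_snd A 0]
  rw [List.count, List.countP_map]
  refine List.countP_congr ?_
  intro x hx
  simp [Function.comp]

theorem s_length (A : List Int) :
    (PySem.List.sorted ((PySem.List.enumerate A).map (fun p => (p.2, p.1))) (fun p => toLex p)).length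
      = A.length := by
  rw [((PySem.List.sorted_perm _ _ _).length_eq), List.length_map]
  have := congrArg List.length (enum_snd A 0)
  simpa using this

theorem s_countP (A : List Int) (c : Int) :
    (PySem.List.sorted ((PySem.List.enumerate A).map (fun p => (p.2, p.1))) (fun p => toLex p)).countP
        (fun p => decide (p.1 = c)) = A.count c := by
  rw [(PySem.List.sorted_perm _ _ _).countP_eq, countP_pairs]

-- a value occurring more than ⌊n/2⌋ times must sit at the middle of the sorted list
theorem middle_fst (A : List Int) (c : Int) (hne : A ≠ [])
    (hmaj : A.length < 2 * A.count c) :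
    ((PySem.List.sorted ((PySem.List.enumerate A).map (fun p => (p.2, p.1))) (fun p => toLex p)).getD
        (A.length / 2) (0, 0)).1 = c := by
  have hlen := s_length A
  have hcount := s_countP A c
  have hn : 0 < A.length := List.length_pos_of_ne_nil hne
  set s := PySem.List.sorted ((PySem.List.enumerate A).map (fun p => (p.2, p.1))) (fun p => toLex p) with hs
  set m := A.length / 2 with hm
  have hms : m < s.length := by omega
  rw [List.getD_eq_getElem s (0,0) hms]
  by_contra hcand
  have hpw : s.Pairwise (fun p q : Int × Int => p.1 ≤ q.1) := by
    have hp := PySem.List.sorted_pairwise ((PySem.List.enumerate A).map (fun p => (p.2, p.1)))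
      (fun p => toLex p)
    rw [← hs] at hp
    exact hp.imp (fun h => by rcases Prod.Lex.toLex_le_toLex.mp h with h | ⟨h, _⟩ <;> omega)
  have hmono : ∀ (j k : ℕ) (hk : k < s.length) (hjk : j ≤ k),
      (s[j]'(lt_of_le_of_lt hjk hk)).1 ≤ (s[k]'hk).1 := by
    intro j k hk hjk
    rcases Nat.lt_or_eq_of_le hjk with h | h
    · exact List.pairwise_iff_getElem.mp hpw j k (lt_of_le_of_lt hjk hk) hk h
    · subst h; exact le_rfl
  rcases lt_trichotomy (s[m]'hms).1 c with hlt | heq | hgt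
  · -- everything up to index m is < c, so count c ≤ len - m - 1: too few
    have h0 : (s.take (m+1)).countP (fun p => decide (p.1 = c)) = 0 := by
      refine List.countP_eq_zero.mpr ?_
      intro x hx
      obtain ⟨j, hj, hxe⟩ := List.mem_iff_getElem.mp hx
      have hj2 : j ≤ m := by
        have := hj; rw [List.length_take] at this; omega
      have hjs : j < s.length := by omega
      have : (s.take (m+1))[j]'hj = s[j]'hjs := List.getElem_take
      rw [this] at hxe
      have := hmono j m hms hj2
      rw [hxe] at this
      simp only [decide_eq_true_eq]
      omega
    have hsplit : s.countP (fun p => decide (p.1 = c))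
        = (s.take (m+1)).countP (fun p => decide (p.1 = c))
          + (s.drop (m+1)).countP (fun p => decide (p.1 = c)) := by
      conv_lhs => rw [← List.take_append_drop (m+1) s]
      rw [List.countP_append]
    have hle := List.countP_le_length (l := s.drop (m+1)) (p := fun p => decide (p.1 = c))
    rw [List.length_drop] at hle
    omega
  · exact hcand heq
  · -- everything from index m on is > c, so count c ≤ m: too few
    have h0 : (s.drop m).countP (fun p => decide (p.1 = c)) = 0 := by
      refine List.countP_eq_zero.mpr ?_
      intro x hx
      obtain ⟨j, hj, hxe⟩ := List.mem_iff_getElem.mp hx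
      have hjs : m + j < s.length := by
        have := hj; rw [List.length_drop] at this; omega
      have : (s.drop m)[j]'hj = s[m + j]'hjs := List.getElem_drop
      rw [this] at hxe
      have := hmono m (m + j) hjs (by omega)
      rw [hxe] at this
      simp only [decide_eq_true_eq]
      omega
    have hsplit : s.countP (fun p => decide (p.1 = c))
        = (s.take m).countP (fun p => decide (p.1 = c))
          + (s.drop m).countP (fun p => decide (p.1 = c)) := by
      conv_lhs => rw [← List.take_append_drop m s]
      rw [List.countP_append]
    have hle := List.countP_le_length (l := s.take m) (p := fun p => decide (p.1 = c))
    rw [List.length_take] at hle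
    omega

theorem pairs_pairwise (A : List Int) :
    ((PySem.List.enumerate A).map (fun p => (p.2, p.1))).Pairwise
      (fun p q : Int × Int => p.2 < q.2) := by
  rw [List.pairwise_map]
  exact enum_pairwise A 0

-- sorting does not change the relative order of the pairs carrying one fixed value
theorem filter_s_eq (A : List Int) (c : Int) :
    (PySem.List.sorted ((PySem.List.enumerate A).map (fun p => (p.2, p.1))) (fun p => toLex p)).filter
        (fun p => decide (p.1 = c))
      = ((PySem.List.enumerate A).map (fun p => (p.2, p.1))).filter (fun p => decide (p.1 = c)) := by
  have hperm := (PySem.List.sorted_perm ((PySem.List.enumerate A).map (fun p => (p.2, p.1)))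
    (fun p => toLex p) false).filter (fun p => decide (p.1 = c))
  have hpw2 := pairs_pairwise A
  have hpwB : (((PySem.List.enumerate A).map (fun p => (p.2, p.1))).filter
      (fun p => decide (p.1 = c))).Pairwise (fun p q : Int × Int => p.2 < q.2) := hpw2.filter _
  have hne : (PySem.List.sorted ((PySem.List.enumerate A).map (fun p => (p.2, p.1)))
      (fun p => toLex p)).Pairwise (fun p q : Int × Int => p.2 ≠ q.2) := by
    refine ((PySem.List.sorted_perm _ _ _).pairwise_iff ?_).mpr (hpw2.imp (fun h => ne_of_lt h))
    intro a b h
    exact (h ·.symm)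
  have hle := PySem.List.sorted_pairwise ((PySem.List.enumerate A).map (fun p => (p.2, p.1)))
    (fun p => toLex p)
  have hpwA : ((PySem.List.sorted ((PySem.List.enumerate A).map (fun p => (p.2, p.1)))
      (fun p => toLex p)).filter (fun p => decide (p.1 = c))).Pairwise
      (fun p q : Int × Int => p.2 < q.2) := by
    have hand := (hle.and hne).filter (fun p => decide (p.1 = c))
    refine hand.imp_of_mem ?_
    intro a b ha hb hab
    have ha1 : a.1 = c := by simpa using List.of_mem_filter ha
    have hb1 : b.1 = c := by simpa using List.of_mem_filter hb
    rcases Prod.Lex.toLex_le_toLex.mp hab.1 with h | ⟨_, h⟩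
    · omega
    · exact lt_of_le_of_ne h hab.2
  exact List.Perm.eq_of_pairwise (fun a b _ _ h h' => absurd h' (lt_asymm h)) hpwA hpwB hperm

-- splitting a list of pairs at the last pair carrying the value c
theorem split_last (c : Int) (l : List (Int × Int)) (h : c ∈ l.map Prod.snd) :
    ∃ u q v, l = u ++ q :: v ∧ q.2 = c ∧ ∀ p ∈ v, p.2 ≠ c := by
  induction l with
  | nil => simp at h
  | cons x t ih =>
    by_cases ht : c ∈ t.map Prod.snd
    · obtain ⟨u, q, v, rfl, hq, hv⟩ := ih ht
      exact ⟨x :: u, q, v, rfl, hq, hv⟩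
    · simp at h
      rcases h with h | h
      · exact ⟨[], x, t, rfl, h.symm, fun p hp hc => ht (List.mem_map.mpr ⟨p, hp, hc⟩)⟩
      · obtain ⟨a, ha⟩ := h
        exact absurd (List.mem_map.mpr ⟨(a, c), ha, rfl⟩) ht

-- ---- B-side loop analysis ----

-- B's loop body (definitionally the lambda in solution_alt)
def pvStep (mid : Int) (st : PySem.Dict Int Int × Int) (p : Int × Int) :
    PySem.Dict Int Int × Int :=
  let counts := st.1.insert p.2 (st.1.getD p.2 0 + 1)
  (counts, if counts.getD p.2 0 > mid then p.1 else st.2)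

def pvCnt (ws : List Int) : PySem.Dict Int Int :=
  ws.foldl (fun d x => d.insert x (d.getD x 0 + 1)) PySem.Dict.empty

theorem pvCnt_getD (ws : List Int) (v : Int) : (pvCnt ws).getD v 0 = (ws.count v : Int) := by
  unfold pvCnt
  rw [PySem.Dict.getD_foldl_insert_add_one]
  simp

theorem pvCnt_append_singleton (ws : List Int) (x : Int) :
    pvCnt (ws ++ [x]) = (pvCnt ws).insert x ((pvCnt ws).getD x 0 + 1) := by
  unfold pvCnt
  rw [List.foldl_append, List.foldl_cons, List.foldl_nil]

theorem b_fst (mid : Int) (l : List (Int × Int)) : ∀ (d : PySem.Dict Int Int) (b : Int),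
    (l.foldl (pvStep mid) (d, b)).1 = l.foldl (fun d p => d.insert p.2 (d.getD p.2 0 + 1)) d := by
  induction l with
  | nil => intro d b; rfl
  | cons p t ih => intro d b; rw [List.foldl_cons, List.foldl_cons]; exact ih _ _

-- a stretch of the loop in which no running count can exceed mid leaves best unchanged
theorem b_noTrig (mid : Int) : ∀ (v : List (Int × Int)) (ws : List Int) (b : Int),
    (∀ p ∈ v, ((ws.count p.2 : Int) + ((v.map Prod.snd).count p.2 : Int)) ≤ mid) →
    v.foldl (pvStep mid) (pvCnt ws, b) = (pvCnt (ws ++ v.map Prod.snd), b) := by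
  intro v
  induction v with
  | nil => intro ws b _; simp
  | cons p t ih =>
    intro ws b h
    rw [List.foldl_cons]
    have hstep : pvStep mid (pvCnt ws, b) p = (pvCnt (ws ++ [p.2]), b) := by
      unfold pvStep
      rw [← pvCnt_append_singleton]
      have hcond : ¬ ((pvCnt (ws ++ [p.2])).getD p.2 0 > mid) := by
        rw [pvCnt_getD]
        have := h p (List.mem_cons_self)
        have hc : (((p :: t).map Prod.snd).count p.2) = (t.map Prod.snd).count p.2 + 1 := by
          simp
        rw [List.count_append]
        simp only [List.count_singleton]
        push_cast
        rw [hc] at this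
        push_cast at this
        omega
      show (pvCnt (ws ++ [p.2]), if (pvCnt (ws ++ [p.2])).getD p.2 0 > mid then p.1 else b)
          = (pvCnt (ws ++ [p.2]), b)
      rw [if_neg hcond]
    rw [hstep, ih (ws ++ [p.2]) b ?_]
    · rw [List.map_cons, List.append_assoc]; rfl
    · intro p' hp'
      have := h p' (List.mem_cons_of_mem _ hp')
      rw [List.count_append]
      simp only [List.map_cons, List.count_cons] at this ⊢
      push_cast at this ⊢
      split_ifs at this <;> simp_all <;> omega

theorem solution_alt_eq_foldl (A : List Int) :
    solution_alt A
      = ((PySem.List.enumerate A).foldl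
          (pvStep (PySem.Int.floordiv (PySem.List.len A) 2)) (PySem.Dict.empty, -1)).2 := rfl

theorem mid_cast (A : List Int) :
    PySem.Int.floordiv (PySem.List.len A) 2 = ((A.length / 2 : Nat) : Int) := by
  show PySem.Int.floordiv ((A.length : Int)) 2 = _
  exact_mod_cast PySem.Int.floordiv_natCast A.length 2

theorem b_nomaj (A : List Int) (hno : ∀ c, 2 * A.count c ≤ A.length) : solution_alt A = -1 := by
  rw [solution_alt_eq_foldl, mid_cast]
  have h := b_noTrig ((A.length / 2 : Nat) : Int) (PySem.List.enumerate A) [] (-1) ?_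
  · rw [show pvCnt [] = PySem.Dict.empty from rfl] at h
    rw [h]
  · intro p hp
    rw [enum_snd]
    have := hno p.2
    have hc := List.count_le_length (l := A) (a := p.2)
    simp only [List.count_nil]
    push_cast
    have : A.count p.2 ≤ A.length / 2 := by omega
    omega

theorem b_major (A : List Int) (c : Int) (u : List (Int × Int)) (q : Int × Int)
    (v : List (Int × Int))
    (hsplit : PySem.List.enumerate A = u ++ q :: v) (hq : q.2 = c) (hv : ∀ p ∈ v, p.2 ≠ c)
    (hmaj : A.length < 2 * A.count c)
    (huniq : ∀ c', c' ≠ c → 2 * A.count c' ≤ A.length) :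
    solution_alt A = q.1 := by
  rw [solution_alt_eq_foldl, mid_cast, hsplit, List.foldl_append, List.foldl_cons]
  set st := u.foldl (pvStep ((A.length / 2 : Nat) : Int)) (PySem.Dict.empty, -1) with hst
  have hfst : st.1 = pvCnt (u.map Prod.snd) := by
    rw [hst, b_fst]
    unfold pvCnt
    rw [List.foldl_map]
  have hA : A = u.map Prod.snd ++ c :: v.map Prod.snd := by
    conv_lhs => rw [← enum_snd A 0, hsplit]
    simp [hq]
  have hvc : (v.map Prod.snd).count c = 0 := by
    rw [List.count_eq_zero]
    intro hc
    obtain ⟨p, hp, hpc⟩ := List.mem_map.mp hc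
    exact hv p hp hpc
  have hcc : (u.map Prod.snd).count c + 1 = A.count c := by
    rw [hA, List.count_append, List.count_cons_self, hvc]
  have hstep : pvStep ((A.length / 2 : Nat) : Int) st q = (pvCnt (u.map Prod.snd ++ [c]), q.1) := by
    have hv1 : st = (st.1, st.2) := rfl
    rw [hv1, hfst]
    show (pvCnt (u.map Prod.snd) |>.insert q.2 ((pvCnt (u.map Prod.snd)).getD q.2 0 + 1),
      if ((pvCnt (u.map Prod.snd)).insert q.2 ((pvCnt (u.map Prod.snd)).getD q.2 0 + 1)).getD q.2 0
          > ((A.length / 2 : Nat) : Int) then q.1 else st.2) = _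
    rw [hq, ← pvCnt_append_singleton, if_pos ?_]
    rw [pvCnt_getD]
    have h1 : (u.map Prod.snd ++ [c]).count c = (u.map Prod.snd).count c + 1 := by simp
    have h2 : A.length / 2 < (u.map Prod.snd ++ [c]).count c := by omega
    exact_mod_cast h2
  rw [hstep]
  have h := b_noTrig ((A.length / 2 : Nat) : Int) v (u.map Prod.snd ++ [c]) q.1 ?_
  · rw [h]
  · intro p hp
    have hpc := hv p hp
    have h2 := huniq p.2 hpc
    have hcount : (u.map Prod.snd ++ [c]).count p.2 + (v.map Prod.snd).count p.2
        = A.count p.2 := by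
      rw [hA]
      simp only [List.count_append, List.count_cons, List.count_nil, beq_iff_eq,
        if_neg (show ¬ c = p.2 from fun h => hpc h.symm)]
      omega
    have h4 : (u.map Prod.snd ++ [c]).count p.2 + (v.map Prod.snd).count p.2 ≤ A.length / 2 := by
      omega
    exact_mod_cast h4

-- ---- A-side evaluation ----

theorem a_major (A : List Int) (c : Int) (u : List (Int × Int)) (q : Int × Int)
    (v : List (Int × Int))
    (hsplit : PySem.List.enumerate A = u ++ q :: v) (hq : q.2 = c) (hv : ∀ p ∈ v, p.2 ≠ c)
    (hmaj : A.length < 2 * A.count c) :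
    solution A = q.1 := by
  have hne : A ≠ [] := by
    intro h
    subst h
    simp at hmaj
  simp only [solution, if_neg hne, sorted2_eq_sorted_lex]
  set s := PySem.List.sorted ((PySem.List.enumerate A).map (fun p => (p.2, p.1)))
    (fun p => toLex p) with hs
  have hmid : PySem.Int.floordiv (PySem.List.len s) 2 = ((A.length / 2 : Nat) : Int) := by
    show PySem.Int.floordiv ((s.length : Nat) : Int) 2 = _
    rw [hs, s_length]
    exact_mod_cast PySem.Int.floordiv_natCast A.length 2
  rw [hmid]
  have hcand : (PySem.List.pyGetD s ((A.length / 2 : Nat) : Int) ((0:Int), (0:Int))).1 = c := by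
    rw [PySem.List.pyGetD_natCast, hs]
    exact middle_fst A c hne hmaj
  rw [hcand]
  have hpm := PySem.List.foldl_prod_mk
    (f := fun (b : Int) (p : Int × Int) => if p.1 = c then p.2 else b)
    (g := fun (k : Int) (p : Int × Int) => if p.1 = c then k + 1 else k) s 0 0
  rw [hpm]
  rw [PySem.List.foldl_ite_add_one (p := fun p : Int × Int => p.1 = c)]
  rw [foldl_last_if]
  rw [hs, s_countP, filter_s_eq]
  have hcnt : ((0 : Int) + (A.count c : Int) > ((A.length / 2 : Nat) : Int)) := by
    have : A.count c ≤ A.length := List.count_le_length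
    have h2 : A.length / 2 < A.count c := by omega
    push_cast
    omega
  rw [if_pos hcnt]
  rw [hsplit, List.map_append, List.map_cons, List.filter_append, List.filter_cons]
  have hqp : (decide (((q.2, q.1) : Int × Int).1 = c)) = true := by simpa using hq
  rw [hqp]
  have hvf : ((v.map (fun p => (p.2, p.1))).filter (fun p : Int × Int => decide (p.1 = c))) = [] := by
    rw [List.filter_eq_nil_iff]
    intro a ha
    obtain ⟨p, hp, rfl⟩ := List.mem_map.mp ha
    simpa using hv p hp
  rw [hvf]
  simp [List.getLastD_concat]

theorem a_nomaj (A : List Int) (hne : A ≠ []) (hno : ∀ c, 2 * A.count c ≤ A.length) :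
    solution A = -1 := by
  simp only [solution, if_neg hne, sorted2_eq_sorted_lex]
  set s := PySem.List.sorted ((PySem.List.enumerate A).map (fun p => (p.2, p.1)))
    (fun p => toLex p) with hs
  have hmid : PySem.Int.floordiv (PySem.List.len s) 2 = ((A.length / 2 : Nat) : Int) := by
    show PySem.Int.floordiv ((s.length : Nat) : Int) 2 = _
    rw [hs, s_length]
    exact_mod_cast PySem.Int.floordiv_natCast A.length 2
  rw [hmid]
  set cand := (PySem.List.pyGetD s ((A.length / 2 : Nat) : Int) ((0:Int), (0:Int))).1 with hc
  have hpm := PySem.List.foldl_prod_mk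
    (f := fun (b : Int) (p : Int × Int) => if p.1 = cand then p.2 else b)
    (g := fun (k : Int) (p : Int × Int) => if p.1 = cand then k + 1 else k) s 0 0
  rw [hpm]
  rw [PySem.List.foldl_ite_add_one (p := fun p : Int × Int => p.1 = cand)]
  rw [hs, s_countP]
  rw [if_neg ?_]
  have := hno cand
  have h2 : A.count cand ≤ A.length / 2 := by omega
  push_cast
  omega

-- ---- the equivalence ----

theorem solution_main (A : List Int) : solution A = solution_alt A := by
  by_cases hA : A = []
  · subst hA; rfl
  · by_cases hmaj : ∃ c, A.length < 2 * A.count c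
    · obtain ⟨c, hc⟩ := hmaj
      have huniq : ∀ c', c' ≠ c → 2 * A.count c' ≤ A.length := by
        intro c' hne'
        have := count_two_le A c c' (fun h => hne' h.symm)
        omega
      have hmem : c ∈ A := by
        have hcl := List.count_le_length (l := A) (a := c)
        have : 0 < A.count c := by omega
        exact List.count_pos_iff.mp this
      have hmem2 : c ∈ (PySem.List.enumerate A).map Prod.snd := by
        rw [enum_snd]; exact hmem
      obtain ⟨u, q, v, hsplit, hq, hv⟩ := split_last c _ hmem2
      rw [a_major A c u q v hsplit hq hv hc, b_major A c u q v hsplit hq hv hc huniq]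
    · push_neg at hmaj
      exact (a_nomaj A hA (fun c => hmaj c)).trans (b_nomaj A (fun c => hmaj c)).symm

-- ===== VERDICT (by name: the statement is the Claim_ definition above) =====
theorem solution_spec : Claim_equal_solution := by
  intro A _
  unfold Spec_solution
  exact solution_main A
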